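-- pv_equiv track=rewrite | github.com/MicheleSpecchia/probity | src/pmx/jobs/build_audit_bundle.py | _normalize_warning_records
-- ===== SOURCE A (Python) =====
-- from collections.abc import Mapping, Sequence
-- from typing import Any
--
-- def _normalize_warning_records(records: Sequence[Mapping[str, str]]) -> tuple[dict[str, str], ...]:
--     deduped: dict[tuple[str, str, str], dict[str, str]] = {}
--     for record in records:
--         code = _optional_text(record.get("code")) or "unknown_warning"
--         message = _optional_text(record.get("message")) or ""
--         source = _optional_text(record.get("source")) or "audit_bundle"
--         deduped[(code, message, source)] = {
--             "code": code,
--             "message": message,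
--             "source": source,
--         }
--     keys = sorted(deduped.keys(), key=lambda item: item)
--     return tuple(deduped[key] for key in keys)
--
-- def _optional_text(raw: Any) -> str | None:
--     if raw is None:
--         return None
--     value = str(raw).strip()
--     return value or None
-- ===== SOURCE B (Python) =====
-- def _normalize_warning_records(records):
--     # sort-then-dedup-adjacent instead of dict-dedup-then-sort
--     triples = sorted(_norm_triple(record) for record in records)
--     out = []
--     prev = None
--     for triple in triples:
--         if triple != prev:
--             code, message, source = triple
--             out.append({"code": code, "message": message, "source": source})
--             prev = triple
--     return tuple(out)
--
--
-- def _text_or_default(raw, default):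
--     if raw is None:
--         return default
--     value = str(raw).strip()
--     return value if value else default
--
--
-- def _norm_triple(record):
--     return (
--         _text_or_default(record.get("code"), "unknown_warning"),
--         _text_or_default(record.get("message"), ""),
--         _text_or_default(record.get("source"), "audit_bundle"),
--     )
-- ===== Notes on version B (the rewrite author's own statement) =====
-- stated objective: alternative
-- what changed: B normalizes every record to a (code,message,source) triple, sorts the triple list, and dedupes by skipping adjacent equal triples in one pass, instead of A's dict-keyed dedup followed by sorting the dict keys.
import Mathlib
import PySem

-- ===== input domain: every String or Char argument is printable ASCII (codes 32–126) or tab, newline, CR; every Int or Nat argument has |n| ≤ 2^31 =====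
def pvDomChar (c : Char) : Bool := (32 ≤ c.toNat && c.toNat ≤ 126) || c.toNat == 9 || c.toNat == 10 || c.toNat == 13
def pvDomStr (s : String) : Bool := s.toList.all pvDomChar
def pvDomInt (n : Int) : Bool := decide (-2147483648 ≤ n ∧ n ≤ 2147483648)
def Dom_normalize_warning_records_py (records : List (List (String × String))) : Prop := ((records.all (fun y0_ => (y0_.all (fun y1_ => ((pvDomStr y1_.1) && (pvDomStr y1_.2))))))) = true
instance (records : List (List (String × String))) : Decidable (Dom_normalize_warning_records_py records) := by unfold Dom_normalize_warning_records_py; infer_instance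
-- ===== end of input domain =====

-- B re-implements A as sort-then-dedup-adjacent over normalized (code,message,source)
-- triples instead of A's dict-keyed dedup followed by a sort of the dict keys
-- (objective: alternative decomposition, same exact return value; A is total, no Pre_).

-- Python compares the 3-tuples of strings lexicographically: that is exactly the
-- Prod.Lex order on String ×ₗ String ×ₗ String (Lean's String < is Python's on the ASCII domain).
def pvLexKey (t : String × String × String) : String ×ₗ String ×ₗ String :=
  toLex (t.1, toLex (t.2.1, t.2.2))

-- ===== PORT A =====
def optional_text_py (raw : Option String) : Option String :=
  match raw with
  | none => none
  | some s =>
    let value := PySem.Str.strip s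
    if value = "" then none else some value

def normalize_warning_records_py (records : List (List (String × String))) : List (List (String × String)) :=
  let deduped : PySem.Dict (String × String × String) (List (String × String)) :=
    records.foldl (fun d record =>
      let code := (optional_text_py ((PySem.Dict.mk record).get? "code")).getD "unknown_warning"
      let message := (optional_text_py ((PySem.Dict.mk record).get? "message")).getD ""
      let source := (optional_text_py ((PySem.Dict.mk record).get? "source")).getD "audit_bundle"
      d.insert (code, message, source) [("code", code), ("message", message), ("source", source)])
      PySem.Dict.empty
  let keys := PySem.List.sorted deduped.keys pvLexKey false
  -- deduped[key]: key is drawn from deduped's own keys, so KeyError is impossible; get?/getD [] is exact here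
  keys.map (fun k => (deduped.get? k).getD [])

-- ===== PORT B =====
def text_or_default (raw : Option String) (dflt : String) : String :=
  match raw with
  | none => dflt
  | some s =>
    let value := PySem.Str.strip s
    if value = "" then dflt else value

def norm_triple (record : List (String × String)) : String × String × String :=
  ((text_or_default ((PySem.Dict.mk record).get? "code") "unknown_warning"),
   (text_or_default ((PySem.Dict.mk record).get? "message") ""),
   (text_or_default ((PySem.Dict.mk record).get? "source") "audit_bundle"))

-- the 'for triple in triples: if triple != prev: out.append({...}); prev = triple' loop
def emit_distinct : Option (String × String × String) → List (String × String × String) → List (List (String × String))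
  | _, [] => []
  | prev, t :: rest =>
    if some t ≠ prev then
      [("code", t.1), ("message", t.2.1), ("source", t.2.2)] :: emit_distinct (some t) rest
    else
      emit_distinct prev rest

def normalize_warning_records_py_alt (records : List (List (String × String))) : List (List (String × String)) :=
  emit_distinct none (PySem.List.sorted (records.map norm_triple) pvLexKey false)

-- ===== PRECONDITION & SPEC =====
def Spec_normalize_warning_records_py (records : List (List (String × String))) (out : List (List (String × String))) : Prop := out = normalize_warning_records_py_alt records
instance (records : List (List (String × String))) (out : List (List (String × String))) : Decidable (Spec_normalize_warning_records_py records out) := by unfold Spec_normalize_warning_records_py; infer_instance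

-- ===== CLAIM (what is proved, stated in full; the proofs are below) =====
def Claim_equal_normalize_warning_records_py : Prop := ∀ (records : List (List (String × String))), Dom_normalize_warning_records_py records → Spec_normalize_warning_records_py records (normalize_warning_records_py records)

-- ===== LEMMAS AND PROOFS =====

-- the dict value A stores under a key is determined by the key
def pvMkd (t : String × String × String) : List (String × String) :=
  [("code", t.1), ("message", t.2.1), ("source", t.2.2)]

-- proof-side triple-level version of B's dedup loop
def pvDedupT : Option (String × String × String) → List (String × String × String) → List (String × String × String)
  | _, [] => []
  | prev, t :: rest => if some t ≠ prev then t :: pvDedupT (some t) rest else pvDedupT prev rest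

theorem pvLexKey_injective : Function.Injective pvLexKey := by
  intro a b h
  have h' := congrArg ofLex h
  simp only [pvLexKey, ofLex_toLex] at h'
  have h1 := congrArg Prod.fst h'
  have h2 := congrArg (fun p => ofLex p.2) h'
  simp only [ofLex_toLex] at h1 h2
  exact Prod.ext_iff.mpr ⟨h1, Prod.ext_iff.mpr ⟨congrArg Prod.fst h2, congrArg Prod.snd h2⟩⟩

theorem emit_distinct_eq_map (prev : Option (String × String × String)) (l : List (String × String × String)) :
    emit_distinct prev l = (pvDedupT prev l).map pvMkd := by
  induction l generalizing prev with
  | nil => rfl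
  | cons t rest ih =>
    simp only [emit_distinct, pvDedupT]
    split
    · simp [pvMkd, ih]
    · exact ih prev

theorem optional_text_getD (raw : Option String) (dflt : String) :
    (optional_text_py raw).getD dflt = text_or_default raw dflt := by
  cases raw with
  | none => rfl
  | some s =>
    simp only [optional_text_py, text_or_default]
    split <;> rfl

theorem mem_of_mem_pvDedupT (x : String × String × String) :
    ∀ (l : List (String × String × String)) (prev : Option (String × String × String)),
      x ∈ pvDedupT prev l → x ∈ l := by
  intro l
  induction l with
  | nil => intro prev h; simp [pvDedupT] at h
  | cons t rest ih =>
    intro prev h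
    simp only [pvDedupT] at h
    split at h
    · rcases List.mem_cons.mp h with h | h
      · simp [h]
      · exact List.mem_cons_of_mem _ (ih _ h)
    · exact List.mem_cons_of_mem _ (ih _ h)

theorem mem_pvDedupT_of_mem (x : String × String × String) :
    ∀ (l : List (String × String × String)) (prev : Option (String × String × String)),
      x ∈ l → x ∈ pvDedupT prev l ∨ prev = some x := by
  intro l
  induction l with
  | nil => intro prev h; simp at h
  | cons t rest ih =>
    intro prev h
    by_cases hc : some t = prev
    · rw [pvDedupT, if_neg (by simp [hc])]
      rcases List.mem_cons.mp h with rfl | h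
      · exact Or.inr hc.symm
      · exact ih prev h
    · rw [pvDedupT, if_pos hc]
      rcases List.mem_cons.mp h with rfl | h
      · exact Or.inl (List.mem_cons_self ..)
      · rcases ih (some t) h with h' | h'
        · exact Or.inl (List.mem_cons_of_mem _ h')
        · obtain rfl : t = x := Option.some.inj h'
          exact Or.inl (List.mem_cons_self ..)

theorem not_mem_pvDedupT_self (t : String × String × String) :
    ∀ (l : List (String × String × String)),
      l.Pairwise (fun a b => pvLexKey a ≤ pvLexKey b) →
      (∀ x ∈ l, pvLexKey t ≤ pvLexKey x) →
      t ∉ pvDedupT (some t) l := by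
  intro l
  induction l with
  | nil => intro _ _; simp [pvDedupT]
  | cons u rest ih =>
    intro hp hge
    obtain ⟨hu, hrest⟩ := List.pairwise_cons.mp hp
    by_cases hc : u = t
    · subst hc
      rw [pvDedupT, if_neg (by simp)]
      exact ih hrest (fun x hx => hge x (List.mem_cons_of_mem _ hx))
    · rw [pvDedupT, if_pos (by simp [hc])]
      intro hmem
      rcases List.mem_cons.mp hmem with rfl | hmem
      · exact hc rfl
      · have htr : t ∈ rest := mem_of_mem_pvDedupT t rest (some u) hmem
        have h1 : pvLexKey u ≤ pvLexKey t := hu t htr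
        have h2 : pvLexKey t ≤ pvLexKey u := hge u (List.mem_cons_self ..)
        exact hc (pvLexKey_injective (le_antisymm h1 h2))

theorem pairwise_lt_pvDedupT :
    ∀ (l : List (String × String × String)) (prev : Option (String × String × String)),
      l.Pairwise (fun a b => pvLexKey a ≤ pvLexKey b) →
      (∀ p, prev = some p → ∀ x ∈ l, pvLexKey p ≤ pvLexKey x) →
      (pvDedupT prev l).Pairwise (fun a b => pvLexKey a < pvLexKey b) := by
  intro l
  induction l with
  | nil => intro prev _ _; simp [pvDedupT]
  | cons t rest ih =>
    intro prev hp hprev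
    obtain ⟨ht, hrest⟩ := List.pairwise_cons.mp hp
    by_cases hc : some t = prev
    · rw [pvDedupT, if_neg (by simp [hc])]
      refine ih prev hrest ?_
      intro p hp' x hx
      have hpt : p = t := by rw [hp'] at hc; exact (Option.some.inj hc).symm
      subst hpt
      exact ht x hx
    · rw [pvDedupT, if_pos hc]
      refine List.pairwise_cons.mpr ⟨?_, ih (some t) hrest ?_⟩
      · intro y hy
        have hyr : y ∈ rest := mem_of_mem_pvDedupT y rest (some t) hy
        have hle : pvLexKey t ≤ pvLexKey y := ht y hyr
        have hne : t ≠ y := by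
          intro h; subst h
          exact not_mem_pvDedupT_self t rest hrest ht hy
        exact lt_of_le_of_ne hle (fun h => hne (pvLexKey_injective h))
      · intro p hp' x hx
        exact (Option.some.inj hp') ▸ ht x hx

-- B's result, at the triple level: the adjacent-dedup of the sorted triple list is
-- exactly the sorted list of the distinct triples.
theorem pvDedupT_sorted_eq (ts : List (String × String × String)) :
    PySem.List.sorted (PySem.Set.ofList ts) pvLexKey false
      = pvDedupT none (PySem.List.sorted ts pvLexKey false) := by
  apply PySem.List.sorted_eq_of_perm_of_pairwise_lt
  · -- permutation: both are nodup with the same members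
    have hpl : (pvDedupT none (PySem.List.sorted ts pvLexKey false)).Pairwise
        (fun a b => pvLexKey a < pvLexKey b) :=
      pairwise_lt_pvDedupT _ none (PySem.List.sorted_pairwise ts pvLexKey) (by simp)
    have hnd : (pvDedupT none (PySem.List.sorted ts pvLexKey false)).Nodup :=
      hpl.imp (fun h he => absurd (he ▸ h) (lt_irrefl _))
    refine (List.perm_ext_iff_of_nodup hnd (PySem.Set.nodup_ofList ts)).mpr ?_
    intro x
    constructor
    · intro hx
      exact (PySem.Set.mem_ofList ..).mpr
        ((PySem.List.mem_sorted ..).mp (mem_of_mem_pvDedupT x _ none hx))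
    · intro hx
      have hx' : x ∈ PySem.List.sorted ts pvLexKey false :=
        (PySem.List.mem_sorted ..).mpr ((PySem.Set.mem_ofList ..).mp hx)
      rcases mem_pvDedupT_of_mem x _ none hx' with h | h
      · exact h
      · exact absurd h (by simp)
  · exact pairwise_lt_pvDedupT _ none (PySem.List.sorted_pairwise ts pvLexKey) (by simp)

-- A's fold, with the per-record lets named
theorem foldA_eq (records : List (List (String × String))) :
    (records.foldl (fun d record =>
      let code := (optional_text_py ((PySem.Dict.mk record).get? "code")).getD "unknown_warning"
      let message := (optional_text_py ((PySem.Dict.mk record).get? "message")).getD ""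
      let source := (optional_text_py ((PySem.Dict.mk record).get? "source")).getD "audit_bundle"
      d.insert (code, message, source) [("code", code), ("message", message), ("source", source)])
      (PySem.Dict.empty : PySem.Dict (String × String × String) (List (String × String))))
    = records.foldl (fun d record => d.insert (norm_triple record) (pvMkd (norm_triple record))) PySem.Dict.empty := by
  apply PySem.List.foldl_congr_mem
  intro d r _
  simp [optional_text_getD, norm_triple, pvMkd]

-- every stored value is pvMkd of its key
theorem itemsA (records : List (List (String × String))) :
    ∀ (d : PySem.Dict (String × String × String) (List (String × String))),
      (∀ p ∈ d.items, p.2 = pvMkd p.1) →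
      ∀ p ∈ (records.foldl (fun d record => d.insert (norm_triple record) (pvMkd (norm_triple record))) d).items,
        p.2 = pvMkd p.1 := by
  induction records with
  | nil => intro d hd p hp; exact hd p hp
  | cons r rest ih =>
    intro d hd p hp
    refine ih _ ?_ p hp
    intro q hq
    rcases (PySem.Dict.mem_items_insert ..).mp hq with rfl | ⟨hq', _⟩
    · rfl
    · exact hd q hq'

theorem normalize_eq_map_sorted (records : List (List (String × String))) :
    normalize_warning_records_py records
      = (PySem.List.sorted (PySem.Set.ofList (records.map norm_triple)) pvLexKey false).map pvMkd := by
  unfold normalize_warning_records_py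
  rw [foldA_eq]
  set d := records.foldl (fun d record => d.insert (norm_triple record) (pvMkd (norm_triple record)))
      (PySem.Dict.empty : PySem.Dict (String × String × String) (List (String × String))) with hd
  have hnd : d.keys.Nodup := by
    rw [hd]
    exact PySem.Dict.nodup_keys_foldl_insert_key records norm_triple _ _ PySem.Dict.nodup_keys_empty
  have hkeys : d.keys = PySem.Set.ofList (records.map norm_triple) := by
    rw [hd, PySem.Dict.keys_foldl_insert_key]
    rfl
  have hget : ∀ k ∈ d.keys, (d.get? k).getD [] = pvMkd k := by
    intro k hk
    obtain ⟨⟨k', v⟩, hmem, hk'⟩ := List.mem_map.mp hk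
    subst hk'
    have hv : v = pvMkd k' := itemsA records PySem.Dict.empty (fun p hp => absurd hp (by simp [PySem.Dict.empty])) _ hmem
    rw [PySem.Dict.get?_of_mem_items _ hmem hnd, hv]
    rfl
  rw [← hkeys]
  apply List.map_congr_left
  intro k hk
  exact hget k ((PySem.List.mem_sorted ..).mp hk)

-- ===== VERDICT (by name: the statement is the Claim_ definition above) =====
theorem normalize_warning_records_py_spec : Claim_equal_normalize_warning_records_py := by
  intro records _
  unfold Spec_normalize_warning_records_py normalize_warning_records_py_alt
  rw [emit_distinct_eq_map, ← pvDedupT_sorted_eq, normalize_eq_map_sorted]
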